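-- pv_equiv track=rewrite | github.com/bethanw10/AdventOfCode | Day 4 - Secure Container/Day4.py | is_valid_part_1
-- ===== SOURCE A (Python) =====
-- def is_valid_part_1(n):
--     double_digits = False
--     prev_num = None
--
--     for num in str(n):
--         if prev_num is not None and num < prev_num:
--             return False
--
--         if prev_num == num:
--             double_digits = True
--
--         prev_num = num
--
--     return double_digits
-- ===== SOURCE B (Python) =====
-- def is_valid_part_1(n):
--     s = str(n)
--     return s == ''.join(sorted(s)) and any(a == b for a, b in zip(s, s[1:]))
-- ===== Notes on version B (the rewrite author's own statement) =====
-- stated objective: idiomatic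
-- what changed: Replaces the stateful prev_num scan with short-circuit return by two whole-string tests: s equals sorted(s) (no decrease) and a zip-based adjacent-duplicate check.
import Mathlib
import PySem

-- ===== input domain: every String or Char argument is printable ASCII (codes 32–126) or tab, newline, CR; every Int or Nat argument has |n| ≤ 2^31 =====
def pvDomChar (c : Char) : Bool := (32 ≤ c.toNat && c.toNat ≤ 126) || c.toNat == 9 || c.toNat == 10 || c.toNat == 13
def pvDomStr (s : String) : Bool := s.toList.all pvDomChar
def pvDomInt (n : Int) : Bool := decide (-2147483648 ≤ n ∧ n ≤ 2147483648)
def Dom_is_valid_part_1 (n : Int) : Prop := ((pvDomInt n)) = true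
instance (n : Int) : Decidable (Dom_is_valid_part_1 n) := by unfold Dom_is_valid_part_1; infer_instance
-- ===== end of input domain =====

-- B replaces A's stateful prev_num scan with two whole-string tests (sorted equality + zip adjacency); same results, idiomatic.


-- ===== PORT A =====
-- the for-loop with early 'return False' and state (double_digits, prev_num)
def isValidP1Loop : List Char → Option Char → Bool → Bool
  | [], _, double_digits => double_digits
  | num :: rest, prev_num, double_digits =>
    match prev_num with
    | some p =>
      if num < p then false
      else isValidP1Loop rest (some num) (double_digits || (p == num))
    | none => isValidP1Loop rest (some num) double_digits

def is_valid_part_1 (n : Int) : Bool :=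
  isValidP1Loop (PySem.Int.toStr n).toList none false

-- ===== PORT B =====
def is_valid_part_1_alt (n : Int) : Bool :=
  let s := (PySem.Int.toStr n).toList
  (s == PySem.List.sorted s (fun c => c) false) &&
  (s.zip (PySem.List.slice s (some 1) none)).any (fun p => p.1 == p.2)

-- ===== PRECONDITION & SPEC =====
def Spec_is_valid_part_1 (n : Int) (out : Bool) : Prop := out = is_valid_part_1_alt n
instance (n : Int) (out : Bool) : Decidable (Spec_is_valid_part_1 n out) := by unfold Spec_is_valid_part_1; infer_instance

-- ===== CLAIM (what is proved, stated in full; the proofs are below) =====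
def Claim_equal_is_valid_part_1 : Prop := ∀ (n : Int), Dom_is_valid_part_1 n → Spec_is_valid_part_1 n (is_valid_part_1 n)

-- ===== LEMMAS AND PROOFS =====

-- adjacent non-decreasing starting from p
def chainLeB : Char → List Char → Bool
  | _, [] => true
  | p, c :: r => (p ≤ c : Bool) && chainLeB c r

-- some adjacent pair equal, starting from p
def adjEqB : Char → List Char → Bool
  | _, [] => false
  | p, c :: r => (p == c) || adjEqB c r

theorem isValidP1Loop_some (l : List Char) : ∀ (p : Char) (dd : Bool),
    isValidP1Loop l (some p) dd = (chainLeB p l && (dd || adjEqB p l)) := by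
  induction l with
  | nil => intro p dd; simp [isValidP1Loop, chainLeB, adjEqB]
  | cons c r ih =>
    intro p dd
    simp only [isValidP1Loop, chainLeB, adjEqB]
    by_cases h : c < p
    · simp [h, show ¬ (p ≤ c) from not_le.mpr h]
    · have hle : p ≤ c := not_lt.mp h
      simp [h, hle, ih c (dd || (p == c))]
      cases dd <;> cases (p == c) <;> simp

theorem chainLeB_iff_pairwise (l : List Char) : ∀ p : Char,
    chainLeB p l = true ↔ (p :: l).Pairwise (· ≤ ·) := by
  induction l with
  | nil => intro p; simp [chainLeB]
  | cons c r ih =>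
    intro p
    simp only [chainLeB, Bool.and_eq_true, decide_eq_true_eq, ih c]
    constructor
    · rintro ⟨hpc, hcr⟩
      refine List.Pairwise.cons ?_ hcr
      intro a ha
      rcases List.mem_cons.mp ha with rfl | har
      · exact hpc
      · exact le_trans hpc ((List.pairwise_cons.mp hcr).1 a har)
    · intro h
      exact ⟨(List.pairwise_cons.mp h).1 c (List.mem_cons_self ..),
        (List.pairwise_cons.mp h).2⟩

theorem sorted_eq_iff_chain (p : Char) (r : List Char) :
    ((p :: r) == PySem.List.sorted (p :: r) (fun c => c) false) = chainLeB p r := by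
  by_cases h : chainLeB p r = true
  · rw [h]
    have hp : (p :: r).Pairwise (fun a b => a ≤ b) := (chainLeB_iff_pairwise r p).mp h
    rw [PySem.List.sorted_eq_self_of_pairwise _ _ hp]
    simp
  · rw [Bool.not_eq_true] at h
    rw [h]
    by_contra hne
    have heq : (p :: r) = PySem.List.sorted (p :: r) (fun c => c) false := by
      cases hb : ((p :: r) == PySem.List.sorted (p :: r) (fun c => c) false) with
      | true => exact eq_of_beq hb
      | false => simp [hb] at hne
    have hp : (p :: r).Pairwise (fun a b => a ≤ b) := by
      rw [heq]; exact PySem.List.sorted_pairwise _ _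
    have := (chainLeB_iff_pairwise r p).mpr hp
    rw [h] at this; exact Bool.false_ne_true this

theorem adjEqB_eq_zip_any (l : List Char) : ∀ p : Char,
    adjEqB p l = ((p :: l).zip l).any (fun q => q.1 == q.2) := by
  induction l with
  | nil => intro p; simp [adjEqB]
  | cons c r ih => intro p; simp [adjEqB, List.zip, ih c]

-- ===== VERDICT (by name: the statement is the Claim_ definition above) =====
theorem is_valid_part_1_spec : Claim_equal_is_valid_part_1 := by
  intro n _
  unfold Spec_is_valid_part_1 is_valid_part_1 is_valid_part_1_alt
  cases hs : (PySem.Int.toStr n).toList with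
  | nil => simp [isValidP1Loop, PySem.List.slice]
  | cons c r =>
    simp only [isValidP1Loop, isValidP1Loop_some, PySem.List.slice_from_one, List.tail_cons,
      Bool.false_or]
    rw [sorted_eq_iff_chain, adjEqB_eq_zip_any]
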